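-- pv_equiv track=rewrite | github.com/jhewitt11/Algorithms | C2W1 - Kosaraju/kosaraju.py | compute_scc
-- ===== SOURCE A (Python) =====
-- def compute_scc(m_network):
--     '''
--     Build strongly connected components (SCC) based on nodes found using Depth First Search.
--     '''
--
--     n = len(m_network)-1
--     visited = [False] * (n+1)
--
--     trail = []
--     scc = []
--
--     for k in range(n, 0, -1):
--         if visited[k] == False :
--
--             visited[k] = True
--             trail.append(k)
--             scc.append(k)
--
--             while( len(trail) > 0):
--                 cur = trail[-1]
--
--                 while((len(m_network[cur]) > 0)):
--                     cur = m_network[cur].pop()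
--
--                     if visited[cur] == True:
--                         cur = trail[-1]
--                     else:
--                         scc.append(k)
--                         trail.append(cur)
--                         visited[cur] = True
--                 trail.pop()
--     return scc
-- ===== SOURCE B (Python) =====
-- def compute_scc(m_network):
--     '''
--     Build strongly connected components (SCC) based on nodes found using Depth First Search.
--     Recursive decomposition: dfs(node, k) marks node, records its root k, and keeps
--     popping the node's last remaining edge, recursing into unvisited targets.
--     (Like the original, this consumes the adjacency lists of every visited node.)
--     '''
--     n = len(m_network) - 1
--     visited = [False] * (n + 1)
--     scc = []
--
--     def dfs(node, k):
--         visited[node] = True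
--         scc.append(k)
--         while m_network[node]:
--             nb = m_network[node].pop()
--             if not visited[nb]:
--                 dfs(nb, k)
--
--     for k in range(n, 0, -1):
--         if not visited[k]:
--             dfs(k, k)
--     return scc
-- ===== Notes on version B (the rewrite author's own statement) =====
-- stated objective: simpler
-- what changed: Replaces A's explicit trail stack and nested while loops (with the re-read of trail[-1] after every pop) by a short recursive dfs(node, k) helper; same last-edge-first order and root labeling, expressed as recursion over the graph instead of stack bookkeeping.
import Mathlib
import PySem

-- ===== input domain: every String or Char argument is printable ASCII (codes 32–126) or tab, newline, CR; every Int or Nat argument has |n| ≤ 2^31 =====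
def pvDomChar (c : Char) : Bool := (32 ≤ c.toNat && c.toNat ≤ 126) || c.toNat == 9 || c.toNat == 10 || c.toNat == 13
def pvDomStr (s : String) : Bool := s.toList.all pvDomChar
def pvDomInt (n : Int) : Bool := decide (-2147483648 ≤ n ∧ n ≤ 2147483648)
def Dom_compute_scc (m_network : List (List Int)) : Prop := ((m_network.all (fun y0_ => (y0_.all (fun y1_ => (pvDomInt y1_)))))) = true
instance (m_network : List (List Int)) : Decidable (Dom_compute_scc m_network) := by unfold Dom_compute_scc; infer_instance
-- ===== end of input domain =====

-- B re-expresses A's explicit trail-stack DFS as a recursive dfs helper (same last-edge-first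
-- order, same root labeling); both versions consume (mutate) the adjacency lists of visited
-- nodes in the same way, and the equivalence proved here is about the return value.

-- total number of edges still present in the adjacency structure (termination measure of both ports)
def pvEdges (g : List (List Int)) : Nat := (g.map List.length).sum

-- sum-of-lengths after replacing one list (used only for the ports' termination)
theorem pv_sum_set (g : List (List Int)) (j : Nat) (x l : List Int) (h : g[j]? = some l) :
    ((g.set j x).map List.length).sum + l.length = (g.map List.length).sum + x.length := by
  induction g generalizing j with
  | nil => simp at h
  | cons a g ih =>
    cases j with
    | zero => simp_all; omega
    | succ j =>
      simp only [List.getElem?_cons_succ] at h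
      simp only [List.set_cons_succ, List.map_cons, List.sum_cons]
      have := ih j h
      omega

-- popping the last element of a (nonempty) adjacency list strictly decreases pvEdges
theorem pvEdges_pop_lt (g : List (List Int)) (i : Int)
    (h : PySem.List.pyGetD g i [] ≠ []) :
    pvEdges (PySem.List.pySetD g i (PySem.List.pyGetD g i []).dropLast) < pvEdges g := by
  cases hj : PySem.List.pyIdx? g.length i with
  | none => exfalso; apply h; simp [PySem.List.pyGetD, PySem.List.pyGet?, hj]
  | some j =>
    cases hl : g[j]? with
    | none => exfalso; apply h; simp [PySem.List.pyGetD, PySem.List.pyGet?, hj, hl]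
    | some l =>
      have hD : PySem.List.pyGetD g i [] = l := by
        simp [PySem.List.pyGetD, PySem.List.pyGet?, hj, hl]
      have hS : PySem.List.pySetD g i l.dropLast = g.set j l.dropLast := by
        simp [PySem.List.pySetD, PySem.List.pySet?, hj]
      rw [hD, hS]
      have hs := pv_sum_set g j l.dropLast l hl
      have hlen : l.dropLast.length = l.length - 1 := by simp
      have hpos : 0 < l.length := List.length_pos_iff.mpr (hD ▸ h)
      unfold pvEdges
      omega

-- ===== PORT A =====
-- A's inner `while len(m_network[cur]) > 0` loop; `cur` is Python's cur (kept equal to trail[-1])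
def pvInnerA (g : List (List Int)) (vis : List Bool) (scc trail : List Int) (k cur : Int) :
    List (List Int) × List Bool × List Int × List Int :=
  if h : PySem.List.pyGetD g cur [] = [] then
    (g, vis, scc, trail)
  else
    -- cur = m_network[cur].pop(): last element of the nonempty list, which loses it
    if PySem.List.pyGetD vis (PySem.List.pyGetD (PySem.List.pyGetD g cur []) (-1) 0) false = true then
      pvInnerA (PySem.List.pySetD g cur (PySem.List.pyGetD g cur []).dropLast)
        vis scc trail k (PySem.List.pyGetD trail (-1) 0)
    else
      pvInnerA (PySem.List.pySetD g cur (PySem.List.pyGetD g cur []).dropLast)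
        (PySem.List.pySetD vis (PySem.List.pyGetD (PySem.List.pyGetD g cur []) (-1) 0) true)
        (scc ++ [k])
        (trail ++ [PySem.List.pyGetD (PySem.List.pyGetD g cur []) (-1) 0])
        k (PySem.List.pyGetD (PySem.List.pyGetD g cur []) (-1) 0)
termination_by pvEdges g
decreasing_by
  · exact pvEdges_pop_lt g cur h
  · exact pvEdges_pop_lt g cur h

-- the inner loop never increases pvEdges + trail length, and never shortens the trail
-- (cited by pvOuterA's decreasing_by)
theorem pvInnerA_meas (g : List (List Int)) (vis : List Bool) (scc trail : List Int) (k cur : Int) :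
    pvEdges (pvInnerA g vis scc trail k cur).1 + (pvInnerA g vis scc trail k cur).2.2.2.length
      ≤ pvEdges g + trail.length
    ∧ trail.length ≤ (pvInnerA g vis scc trail k cur).2.2.2.length := by
  induction g, vis, scc, trail, cur using pvInnerA.induct (k := k) with
  | case1 g vis scc trail cur h =>
    rw [pvInnerA, dif_pos h]; simp
  | case2 g vis scc trail cur h hv ih =>
    rw [pvInnerA, dif_neg h, if_pos hv]
    have := pvEdges_pop_lt g cur h
    omega
  | case3 g vis scc trail cur h hv ih =>
    rw [pvInnerA, dif_neg h, if_neg hv]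
    have := pvEdges_pop_lt g cur h
    simp only [List.length_append, List.length_cons, List.length_nil] at *
    omega

-- A's outer `while len(trail) > 0` loop
def pvOuterA (g : List (List Int)) (vis : List Bool) (scc trail : List Int) (k : Int) :
    List (List Int) × List Bool × List Int :=
  if h : trail = [] then (g, vis, scc)
  else
    pvOuterA (pvInnerA g vis scc trail k (PySem.List.pyGetD trail (-1) 0)).1
      (pvInnerA g vis scc trail k (PySem.List.pyGetD trail (-1) 0)).2.1
      (pvInnerA g vis scc trail k (PySem.List.pyGetD trail (-1) 0)).2.2.1
      (pvInnerA g vis scc trail k (PySem.List.pyGetD trail (-1) 0)).2.2.2.dropLast k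
termination_by pvEdges g + trail.length
decreasing_by
  have hm := pvInnerA_meas g vis scc trail k (PySem.List.pyGetD trail (-1) 0)
  have ht : 0 < trail.length := List.length_pos_iff.mpr h
  simp only [List.length_dropLast]
  omega

def compute_scc (m_network : List (List Int)) : List Int :=
  -- n = len(m_network) - 1; visited = [False] * (n + 1)
  ((PySem.List.pyRange ((m_network.length : Int) - 1) 0 (-1)).foldl
    (fun (st : List (List Int) × List Bool × List Int) k =>
      if PySem.List.pyGetD st.2.1 k false = true then st
      else
        -- visited[k] = True; trail.append(k) (trail is empty here); scc.append(k); inner loops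
        pvOuterA st.1 (PySem.List.pySetD st.2.1 k true) (st.2.2 ++ [k]) [k] k)
    (m_network, List.replicate (((m_network.length : Int) - 1) + 1).toNat false, [])).2.2

-- ===== PORT B =====
-- the `while m_network[node]:` loop inside Source B's dfs; the recursive call dfs(nb, k)
-- is inlined as pvGoB after nb's marking/labeling (dfs(v,k) = pvGoB after marking v)
def pvGoB (g : List (List Int)) (vis : List Bool) (scc : List Int) (node k : Int) :
    List (List Int) × List Bool × List Int :=
  if h : PySem.List.pyGetD g node [] = [] then
    (g, vis, scc)
  else
    -- nb = m_network[node].pop()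
    if PySem.List.pyGetD vis (PySem.List.pyGetD (PySem.List.pyGetD g node []) (-1) 0) false = true then
      pvGoB (PySem.List.pySetD g node (PySem.List.pyGetD g node []).dropLast) vis scc node k
    else
      -- dfs(nb, k): visited[nb] = True; scc.append(k); drain nb's list; then resume node's loop
      let r := pvGoB (PySem.List.pySetD g node (PySem.List.pyGetD g node []).dropLast)
        (PySem.List.pySetD vis (PySem.List.pyGetD (PySem.List.pyGetD g node []) (-1) 0) true)
        (scc ++ [k])
        (PySem.List.pyGetD (PySem.List.pyGetD g node []) (-1) 0) k
      -- totalization guard: always true (pvGoB_edges_le below), needed only for termination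
      if h2 : pvEdges r.1 < pvEdges g then pvGoB r.1 r.2.1 r.2.2 node k else r
termination_by pvEdges g
decreasing_by
  · exact pvEdges_pop_lt g node h
  · exact pvEdges_pop_lt g node h
  · exact h2

-- Source B's dfs(v, k): mark v, record k, then drain v's adjacency list
def pvDfsB (g : List (List Int)) (vis : List Bool) (scc : List Int) (v k : Int) :
    List (List Int) × List Bool × List Int :=
  pvGoB g (PySem.List.pySetD vis v true) (scc ++ [k]) v k

def compute_scc_alt (m_network : List (List Int)) : List Int :=
  ((PySem.List.pyRange ((m_network.length : Int) - 1) 0 (-1)).foldl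
    (fun (st : List (List Int) × List Bool × List Int) k =>
      if PySem.List.pyGetD st.2.1 k false = true then st
      else pvDfsB st.1 st.2.1 st.2.2 k k)
    (m_network, List.replicate (((m_network.length : Int) - 1) + 1).toNat false, [])).2.2

-- ===== PRECONDITION & SPEC =====
-- Pre_ excludes exactly the inputs on which A raises IndexError: an out-of-range edge in a list
-- A drains — every list except slot 0's, which is drained only when index 0 (edge value 0 or -len)
-- is referenced by an edge of lists 1..n.
def Pre_compute_scc (m_network : List (List Int)) : Prop :=
  (∀ l ∈ m_network.drop 1, ∀ e ∈ l, PySem.Raise.InRange m_network.length e) ∧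
  ((∀ e ∈ m_network.headD [], PySem.Raise.InRange m_network.length e) ∨
   ∀ l ∈ m_network.drop 1, ∀ e ∈ l, ¬(e = 0 ∨ e = -(m_network.length : Int)))
instance (m_network : List (List Int)) : Decidable (Pre_compute_scc m_network) := by
  unfold Pre_compute_scc; infer_instance

def pvWitness_compute_scc : List (List Int) := [[], [2, -1], [1]]

def Spec_compute_scc (m_network : List (List Int)) (out : List Int) : Prop := out = compute_scc_alt m_network
instance (m_network : List (List Int)) (out : List Int) : Decidable (Spec_compute_scc m_network out) := by unfold Spec_compute_scc; infer_instance

-- ===== CLAIM (what is proved, stated in full; the proofs are below) =====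
def Claim_equal_compute_scc : Prop := ∀ (m_network : List (List Int)), Dom_compute_scc m_network → Pre_compute_scc m_network → Spec_compute_scc m_network (compute_scc m_network)

-- ===== LEMMAS AND PROOFS =====

-- trail[-1] of a trail that ends in v is v
theorem pv_last (t : List Int) (v : Int) : PySem.List.pyGetD (t ++ [v]) (-1) 0 = v := by
  simp [PySem.List.pyGetD, PySem.List.pyGet?_neg_one_append_singleton]

-- pvGoB never increases the edge count (so its totalization guard is always taken)
theorem pvGoB_edges_le_aux (N : Nat) : ∀ (g : List (List Int)) (vis : List Bool) (scc : List Int)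
    (node k : Int), pvEdges g ≤ N → pvEdges (pvGoB g vis scc node k).1 ≤ pvEdges g := by
  induction N using Nat.strong_induction_on with
  | _ N IH =>
    intro g vis scc node k hN
    rw [pvGoB]
    by_cases h : PySem.List.pyGetD g node [] = []
    · rw [dif_pos h]
    · rw [dif_neg h]
      have hpop := pvEdges_pop_lt g node h
      by_cases hv : PySem.List.pyGetD vis (PySem.List.pyGetD (PySem.List.pyGetD g node []) (-1) 0) false = true
      · rw [if_pos hv]
        have := IH (pvEdges (PySem.List.pySetD g node (PySem.List.pyGetD g node []).dropLast))
          (by omega) _ vis scc node k le_rfl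
        omega
      · rw [if_neg hv]
        have hr := IH (pvEdges (PySem.List.pySetD g node (PySem.List.pyGetD g node []).dropLast))
          (by omega) (PySem.List.pySetD g node (PySem.List.pyGetD g node []).dropLast)
          (PySem.List.pySetD vis (PySem.List.pyGetD (PySem.List.pyGetD g node []) (-1) 0) true)
          (scc ++ [k]) (PySem.List.pyGetD (PySem.List.pyGetD g node []) (-1) 0) k le_rfl
        have hguard : pvEdges (pvGoB (PySem.List.pySetD g node (PySem.List.pyGetD g node []).dropLast)
            (PySem.List.pySetD vis (PySem.List.pyGetD (PySem.List.pyGetD g node []) (-1) 0) true)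
            (scc ++ [k]) (PySem.List.pyGetD (PySem.List.pyGetD g node []) (-1) 0) k).1 < pvEdges g := by
          omega
        simp only [dif_pos hguard]
        have := IH (pvEdges (PySem.List.pySetD g node (PySem.List.pyGetD g node []).dropLast))
          (by omega)
          (pvGoB (PySem.List.pySetD g node (PySem.List.pyGetD g node []).dropLast)
            (PySem.List.pySetD vis (PySem.List.pyGetD (PySem.List.pyGetD g node []) (-1) 0) true)
            (scc ++ [k]) (PySem.List.pyGetD (PySem.List.pyGetD g node []) (-1) 0) k).1
          (pvGoB (PySem.List.pySetD g node (PySem.List.pyGetD g node []).dropLast)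
            (PySem.List.pySetD vis (PySem.List.pyGetD (PySem.List.pyGetD g node []) (-1) 0) true)
            (scc ++ [k]) (PySem.List.pyGetD (PySem.List.pyGetD g node []) (-1) 0) k).2.1
          (pvGoB (PySem.List.pySetD g node (PySem.List.pyGetD g node []).dropLast)
            (PySem.List.pySetD vis (PySem.List.pyGetD (PySem.List.pyGetD g node []) (-1) 0) true)
            (scc ++ [k]) (PySem.List.pyGetD (PySem.List.pyGetD g node []) (-1) 0) k).2.2
          node k (by omega)
        omega

theorem pvGoB_edges_le (g : List (List Int)) (vis : List Bool) (scc : List Int) (node k : Int) :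
    pvEdges (pvGoB g vis scc node k).1 ≤ pvEdges g :=
  pvGoB_edges_le_aux (pvEdges g) g vis scc node k le_rfl

-- A's outer loop when the top of the trail has no edges left: pop the trail
theorem pvStepA_empty (g : List (List Int)) (vis : List Bool) (scc t : List Int) (v k : Int)
    (h : PySem.List.pyGetD g v [] = []) :
    pvOuterA g vis scc (t ++ [v]) k = pvOuterA g vis scc t k := by
  have hne : t ++ [v] ≠ [] := by simp
  rw [pvOuterA, dif_neg hne, pv_last, pvInnerA, dif_pos h, List.dropLast_concat]

-- A's outer loop when the top's last edge goes to a visited node: just drop that edge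
theorem pvStepA_vis (g : List (List Int)) (vis : List Bool) (scc t : List Int) (v k : Int)
    (h : PySem.List.pyGetD g v [] ≠ [])
    (hv : PySem.List.pyGetD vis (PySem.List.pyGetD (PySem.List.pyGetD g v []) (-1) 0) false = true) :
    pvOuterA g vis scc (t ++ [v]) k =
      pvOuterA (PySem.List.pySetD g v (PySem.List.pyGetD g v []).dropLast) vis scc (t ++ [v]) k := by
  have hne : t ++ [v] ≠ [] := by simp
  conv_lhs => rw [pvOuterA, dif_neg hne]
  conv_rhs => rw [pvOuterA, dif_neg hne]
  rw [pv_last, pvInnerA, dif_neg h, if_pos hv, pv_last]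

-- A's outer loop when the top's last edge reaches a new node: mark it, label it, push it
theorem pvStepA_new (g : List (List Int)) (vis : List Bool) (scc t : List Int) (v k : Int)
    (h : PySem.List.pyGetD g v [] ≠ [])
    (hv : ¬ PySem.List.pyGetD vis (PySem.List.pyGetD (PySem.List.pyGetD g v []) (-1) 0) false = true) :
    pvOuterA g vis scc (t ++ [v]) k =
      pvOuterA (PySem.List.pySetD g v (PySem.List.pyGetD g v []).dropLast)
        (PySem.List.pySetD vis (PySem.List.pyGetD (PySem.List.pyGetD g v []) (-1) 0) true)
        (scc ++ [k])
        ((t ++ [v]) ++ [PySem.List.pyGetD (PySem.List.pyGetD g v []) (-1) 0]) k := by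
  have hne : t ++ [v] ≠ [] := by simp
  have hne2 : (t ++ [v]) ++ [PySem.List.pyGetD (PySem.List.pyGetD g v []) (-1) 0] ≠ [] := by simp
  conv_lhs => rw [pvOuterA, dif_neg hne]
  conv_rhs => rw [pvOuterA, dif_neg hne2]
  rw [pv_last, pv_last, pvInnerA, dif_neg h, if_neg hv]

-- the simulation: running A's trail machinery with v on top of the trail is Source B's dfs-loop on v
-- followed by A's machinery on the rest of the trail
theorem pvSim (N : Nat) : ∀ (g : List (List Int)) (vis : List Bool) (scc t : List Int) (v k : Int),
    pvEdges g ≤ N →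
    pvOuterA g vis scc (t ++ [v]) k =
      pvOuterA (pvGoB g vis scc v k).1 (pvGoB g vis scc v k).2.1 (pvGoB g vis scc v k).2.2 t k := by
  induction N using Nat.strong_induction_on with
  | _ N IH =>
    intro g vis scc t v k hN
    by_cases h : PySem.List.pyGetD g v [] = []
    · rw [pvStepA_empty g vis scc t v k h, pvGoB, dif_pos h]
    · have hpop := pvEdges_pop_lt g v h
      by_cases hv : PySem.List.pyGetD vis (PySem.List.pyGetD (PySem.List.pyGetD g v []) (-1) 0) false = true
      · rw [pvStepA_vis g vis scc t v k h hv]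
        rw [IH (pvEdges (PySem.List.pySetD g v (PySem.List.pyGetD g v []).dropLast)) (by omega)
          _ vis scc t v k le_rfl]
        conv_rhs => rw [pvGoB, dif_neg h, if_pos hv]
      · rw [pvStepA_new g vis scc t v k h hv]
        rw [IH (pvEdges (PySem.List.pySetD g v (PySem.List.pyGetD g v []).dropLast)) (by omega)
          _ _ _ (t ++ [v]) _ k le_rfl]
        rw [IH (pvEdges (PySem.List.pySetD g v (PySem.List.pyGetD g v []).dropLast)) (by omega)
          _ _ _ t v k (pvGoB_edges_le _ _ _ _ _)]
        have hguard : pvEdges (pvGoB (PySem.List.pySetD g v (PySem.List.pyGetD g v []).dropLast)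
            (PySem.List.pySetD vis (PySem.List.pyGetD (PySem.List.pyGetD g v []) (-1) 0) true)
            (scc ++ [k]) (PySem.List.pyGetD (PySem.List.pyGetD g v []) (-1) 0) k).1 < pvEdges g := by
          have := pvGoB_edges_le (PySem.List.pySetD g v (PySem.List.pyGetD g v []).dropLast)
            (PySem.List.pySetD vis (PySem.List.pyGetD (PySem.List.pyGetD g v []) (-1) 0) true)
            (scc ++ [k]) (PySem.List.pyGetD (PySem.List.pyGetD g v []) (-1) 0) k
          omega
        conv_rhs => rw [pvGoB, dif_neg h, if_neg hv]
        simp only [dif_pos hguard]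

-- the loop bodies of the two top-level folds agree
theorem pvBody_eq (st : List (List Int) × List Bool × List Int) (k : Int) :
    (if PySem.List.pyGetD st.2.1 k false = true then st
     else pvOuterA st.1 (PySem.List.pySetD st.2.1 k true) (st.2.2 ++ [k]) [k] k) =
    (if PySem.List.pyGetD st.2.1 k false = true then st
     else pvDfsB st.1 st.2.1 st.2.2 k k) := by
  by_cases hv : PySem.List.pyGetD st.2.1 k false = true
  · rw [if_pos hv, if_pos hv]
  · rw [if_neg hv, if_neg hv]
    have h := pvSim (pvEdges st.1) st.1 (PySem.List.pySetD st.2.1 k true) (st.2.2 ++ [k]) [] k k le_rfl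
    simp only [List.nil_append] at h
    rw [pvDfsB, h, pvOuterA, dif_pos rfl]

-- ===== VERDICT (by name: the statement is the Claim_ definition above) =====
theorem compute_scc_spec : Claim_equal_compute_scc := by
  intro m_network _ _
  unfold Spec_compute_scc compute_scc compute_scc_alt
  congr 2
  apply List.foldl_ext
  intro st b _
  exact pvBody_eq st b
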